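-- pv_equiv track=rewrite | github.com/Majestic6408/EGEinfa | ЕГЭ-14-03-25/Task-23-11240.py | f
-- ===== SOURCE A (Python) =====
-- def f(st, end, B=False):
--     if st > end:
--         return 0
--     if st == end:
--         return 1
--     if B:
--         return f(st + 2, end) + f(st * 3, end)
--     return f(st + 2, end) + f(st ** 2, end, True) + f(st * 3,end)
-- ===== SOURCE B (Python) =====
-- def get(tab, x, st, end):
--     # tab[i] holds the count for value st + i; values beyond end contribute 0
--     return tab[x - st] if x <= end else 0
--
-- def f(st, end, B=False):
--     # Bottom-up DP over the values in [st, end] instead of A's exponential recursion: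
--     # gF[i] / gT[i] = number of operation sequences from value st+i with B False / True.
--     if st >= end:
--         return 1 if st == end else 0
--     n = end - st
--     gF = [0] * (n + 1)
--     gT = [0] * (n + 1)
--     gF[n] = 1
--     gT[n] = 1
--     for x in range(end - 1, st - 1, -1):
--         gT[x - st] = get(gF, x + 2, st, end) + get(gF, x * 3, st, end)
--         gF[x - st] = get(gF, x + 2, st, end) + get(gT, x * x, st, end) + get(gF, x * 3, st, end)
--     return gT[0] if B else gF[0]
-- ===== Notes on version B (the rewrite author's own statement) =====
-- stated objective: faster
-- what changed: Replaces A's exponential triple-branch recursion with a bottom-up dynamic-programming pass over two flat tables (counts for B=False/B=True) filled from end down to st, so each state is computed once.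
import Mathlib
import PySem

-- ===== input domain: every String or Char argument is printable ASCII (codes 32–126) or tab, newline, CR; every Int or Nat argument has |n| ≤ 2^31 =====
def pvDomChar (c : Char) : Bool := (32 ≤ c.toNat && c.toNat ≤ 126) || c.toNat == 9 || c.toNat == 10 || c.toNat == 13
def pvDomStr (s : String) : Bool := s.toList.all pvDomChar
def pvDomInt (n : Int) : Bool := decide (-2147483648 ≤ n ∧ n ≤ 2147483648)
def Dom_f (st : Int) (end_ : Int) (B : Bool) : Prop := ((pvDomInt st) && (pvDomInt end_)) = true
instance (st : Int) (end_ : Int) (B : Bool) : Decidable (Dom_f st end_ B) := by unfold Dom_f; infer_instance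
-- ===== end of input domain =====

-- B replaces A's exponential recursion by a bottom-up DP over flat tables for the values in [st, end] (objective: faster, asymptotic).


-- ===== PORT A =====
-- A's recursion does not terminate for arbitrary Int inputs (it diverges whenever st < 1 and
-- st < end_), so the literal transliteration takes a fuel parameter; the wrapper `f` supplies
-- 2*(end_-st).toNat + 2 fuel on the inputs where A returns (1 ≤ st or end_ ≤ st), which is
-- proved sufficient there (lemma fAux_stable below); outside those inputs A diverges and
-- nothing is claimed, so the wrapper supplies no fuel (a totality guard, not an algorithm switch).
def fAux : Nat → Int → Int → Bool → Int
  | 0, _, _, _ => 0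
  | n + 1, st, end_, B =>
    if st > end_ then 0
    else if st = end_ then 1
    else if B then fAux n (st + 2) end_ false + fAux n (st * 3) end_ false
    else fAux n (st + 2) end_ false + fAux n (st ^ 2) end_ true + fAux n (st * 3) end_ false

def f (st : Int) (end_ : Int) (B : Bool) : Int :=
  fAux (if 1 ≤ st ∨ end_ ≤ st then 2 * (end_ - st).toNat + 2 else 0) st end_ B

-- ===== PORT B =====
-- Source B's helper `get(tab, x, st, end)`: tab[i] holds the count for value st + i.
-- Exact wherever st ≤ x; every call reached with 1 ≤ st has st ≤ x, so on Pre_f the port is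
-- exact (Python's negative-index wraparound for x < st is unreachable there).
def fAltGet (st end_ : Int) (tab : Array Int) (x : Int) : Int :=
  if x ≤ end_ then tab.getD (x - st).toNat 0 else 0

-- Source B's loop body
def fAltStep (st end_ : Int) (p : Array Int × Array Int) (x : Int) : Array Int × Array Int :=
  let gT := p.2.set! (x - st).toNat (fAltGet st end_ p.1 (x + 2) + fAltGet st end_ p.1 (x * 3))
  let gF := p.1.set! (x - st).toNat
      (fAltGet st end_ p.1 (x + 2) + fAltGet st end_ gT (x * x) + fAltGet st end_ p.1 (x * 3))
  (gF, gT)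

def f_alt (st : Int) (end_ : Int) (B : Bool) : Int :=
  if st ≥ end_ then (if st = end_ then 1 else 0)
  else
    let n := (end_ - st).toNat
    let gF0 := (Array.replicate (n + 1) 0).set! n 1
    let gT0 := (Array.replicate (n + 1) 0).set! n 1
    let r := (PySem.List.pyRange (end_ - 1) (st - 1) (-1)).foldl (fAltStep st end_) (gF0, gT0)
    if B then r.2.getD 0 0 else r.1.getD 0 0

-- ===== PRECONDITION & SPEC =====
-- Pre_f excludes exactly the inputs where A's recursion never returns (RecursionError in
-- Python): st < 1 together with st < end_.  Everywhere A returns, Pre_f holds.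
def Pre_f (st : Int) (end_ : Int) (B : Bool) : Prop := 1 ≤ st ∨ end_ ≤ st
instance (st : Int) (end_ : Int) (B : Bool) : Decidable (Pre_f st end_ B) := by unfold Pre_f; infer_instance
def pvWitness_f : Int × Int × Bool := (1, 9, false)

def Spec_f (st : Int) (end_ : Int) (B : Bool) (out : Int) : Prop := out = f_alt st end_ B
instance (st : Int) (end_ : Int) (B : Bool) (out : Int) : Decidable (Spec_f st end_ B out) := by unfold Spec_f; infer_instance

-- ===== CLAIM (what is proved, stated in full; the proofs are below) =====
def Claim_equal_f : Prop := ∀ (st : Int) (end_ : Int) (B : Bool), Dom_f st end_ B → Pre_f st end_ B → Spec_f st end_ B (f st end_ B)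

-- ===== LEMMAS AND PROOFS =====

-- one-step unfolding of fAux at positive fuel
theorem fAux_succ (n : Nat) (st end_ : Int) (B : Bool) :
    fAux (n + 1) st end_ B =
      (if st > end_ then 0
       else if st = end_ then 1
       else if B then fAux n (st + 2) end_ false + fAux n (st * 3) end_ false
       else fAux n (st + 2) end_ false + fAux n (st ^ 2) end_ true + fAux n (st * 3) end_ false) := rfl

-- fuel needed by fAux at state (st, B)
def fuelμ (end_ st : Int) (B : Bool) : Nat := 2 * (end_ - st).toNat + (if B then 1 else 2)

theorem fuelμ_false (end_ st : Int) : fuelμ end_ st false = 2 * (end_ - st).toNat + 2 := rfl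
theorem fuelμ_true (end_ st : Int) : fuelμ end_ st true = 2 * (end_ - st).toNat + 1 := rfl

-- with at least fuelμ fuel, the result no longer depends on the fuel (for 1 ≤ st)
theorem fAux_stable (end_ : Int) :
    ∀ n m : Nat, ∀ st : Int, ∀ B : Bool, 1 ≤ st →
      fuelμ end_ st B ≤ n → fuelμ end_ st B ≤ m →
      fAux n st end_ B = fAux m st end_ B := by
  intro n
  induction n using Nat.strong_induction_on with
  | _ n ih =>
    intro m st B hst hn hm
    have hμ1 : 1 ≤ fuelμ end_ st B := by cases B <;> simp [fuelμ_true, fuelμ_false]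
    obtain ⟨n', rfl⟩ : ∃ n', n = n' + 1 := ⟨n - 1, by omega⟩
    obtain ⟨m', rfl⟩ : ∃ m', m = m' + 1 := ⟨m - 1, by omega⟩
    by_cases h1 : st > end_
    · simp [fAux_succ, h1]
    by_cases h2 : st = end_
    · simp [fAux_succ, h2]
    have hlt : st < end_ := by omega
    have hsq : st ≤ st * st := le_mul_of_one_le_left (by omega) hst
    have key : ∀ st' : Int, ∀ B' : Bool, 1 ≤ st' →
        fuelμ end_ st' B' ≤ n' → fuelμ end_ st' B' ≤ m' →
        fAux n' st' end_ B' = fAux m' st' end_ B' := by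
      intro st' B' h1' h2' h3'
      exact ih n' (by omega) m' st' B' h1' h2' h3'
    cases B with
    | true =>
      rw [fuelμ_true] at hn hm
      rw [fAux_succ, fAux_succ, if_neg (by omega : ¬ st > end_), if_neg h2,
        if_neg (by omega : ¬ st > end_), if_neg h2]
      simp only [if_true]
      have e1 : fAux n' (st + 2) end_ false = fAux m' (st + 2) end_ false := by
        apply key _ _ (by omega) <;> · rw [fuelμ_false]; omega
      have e3 : fAux n' (st * 3) end_ false = fAux m' (st * 3) end_ false := by
        apply key _ _ (by omega) <;> · rw [fuelμ_false]; omega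
      rw [e1, e3]
    | false =>
      rw [fuelμ_false] at hn hm
      rw [fAux_succ, fAux_succ, if_neg (by omega : ¬ st > end_), if_neg h2,
        if_neg (by omega : ¬ st > end_), if_neg h2]
      simp only [Bool.false_eq_true, if_false]
      have e1 : fAux n' (st + 2) end_ false = fAux m' (st + 2) end_ false := by
        apply key _ _ (by omega) <;> · rw [fuelμ_false]; omega
      have e2 : fAux n' (st ^ 2) end_ true = fAux m' (st ^ 2) end_ true := by
        rw [pow_two]
        apply key _ _ (by nlinarith) <;> · rw [fuelμ_true]; omega
      have e3 : fAux n' (st * 3) end_ false = fAux m' (st * 3) end_ false := by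
        apply key _ _ (by omega) <;> · rw [fuelμ_false]; omega
      rw [e1, e2, e3]

-- the canonical value of A's recursion
def Fv (end_ st : Int) (B : Bool) : Int := fAux (fuelμ end_ st B) st end_ B

theorem Fv_gt (end_ st : Int) (B : Bool) (h : end_ < st) : Fv end_ st B = 0 := by
  unfold Fv
  cases B
  · rw [fuelμ_false, fAux_succ]; simp [h]
  · rw [fuelμ_true, fAux_succ]; simp [h]

theorem Fv_eq (end_ st : Int) (B : Bool) (h : st = end_) : Fv end_ st B = 1 := by
  unfold Fv
  cases B
  · rw [fuelμ_false, fAux_succ]; simp [h]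
  · rw [fuelμ_true, fAux_succ]; simp [h]

theorem Fv_rec_true (end_ st : Int) (h1 : 1 ≤ st) (h2 : st < end_) :
    Fv end_ st true = Fv end_ (st + 2) false + Fv end_ (st * 3) false := by
  unfold Fv
  rw [fuelμ_true, fAux_succ, if_neg (by omega : ¬ st > end_), if_neg (by omega : ¬ st = end_)]
  simp only [if_true]
  have e1 : fAux (2 * (end_ - st).toNat) (st + 2) end_ false
      = fAux (fuelμ end_ (st + 2) false) (st + 2) end_ false := by
    apply fAux_stable _ _ _ _ _ (by omega)
    · rw [fuelμ_false]; omega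
    · exact le_refl _
  have e3 : fAux (2 * (end_ - st).toNat) (st * 3) end_ false
      = fAux (fuelμ end_ (st * 3) false) (st * 3) end_ false := by
    apply fAux_stable _ _ _ _ _ (by omega)
    · rw [fuelμ_false]; omega
    · exact le_refl _
  rw [e1, e3]

theorem Fv_rec_false (end_ st : Int) (h1 : 1 ≤ st) (h2 : st < end_) :
    Fv end_ st false = Fv end_ (st + 2) false + Fv end_ (st * st) true + Fv end_ (st * 3) false := by
  unfold Fv
  have hsq : st ≤ st * st := le_mul_of_one_le_left (by omega) h1
  rw [fuelμ_false,
    (by omega : 2 * (end_ - st).toNat + 2 = (2 * (end_ - st).toNat + 1) + 1),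
    fAux_succ, if_neg (by omega : ¬ st > end_), if_neg (by omega : ¬ st = end_)]
  simp only [Bool.false_eq_true, if_false]
  have e1 : fAux (2 * (end_ - st).toNat + 1) (st + 2) end_ false
      = fAux (fuelμ end_ (st + 2) false) (st + 2) end_ false := by
    apply fAux_stable _ _ _ _ _ (by omega)
    · rw [fuelμ_false]; omega
    · exact le_refl _
  have e2 : fAux (2 * (end_ - st).toNat + 1) (st ^ 2) end_ true
      = fAux (fuelμ end_ (st * st) true) (st * st) end_ true := by
    rw [pow_two]
    apply fAux_stable _ _ _ _ _ (by nlinarith)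
    · rw [fuelμ_true]; omega
    · exact le_refl _
  have e3 : fAux (2 * (end_ - st).toNat + 1) (st * 3) end_ false
      = fAux (fuelμ end_ (st * 3) false) (st * 3) end_ false := by
    apply fAux_stable _ _ _ _ _ (by omega)
    · rw [fuelμ_false]; omega
    · exact le_refl _
  rw [e1, e2, e3]

-- set! is setIfInBounds (bridge for the Array lemmas)
theorem arraySet!_eq (a : Array Int) (i : Nat) (v : Int) : a.set! i v = a.setIfInBounds i v := rfl

-- the table property after k iterations: entry i holds Fv end_ (st+i) b for i ≥ n-k, else 0
def TabP (st end_ : Int) (n k : Nat) (b : Bool) (a : Array Int) : Prop :=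
  ∀ i : Nat, a[i]? = if i < n + 1 then some (if n - k ≤ i then Fv end_ (st + i) b else 0) else none

-- Source B's `get` reads Fv out of a table with TabP, for every x ≥ end_ - k (Fv is 0 above end_)
theorem fAltGet_eq (st end_ : Int) (n k : Nat) (b : Bool) (a : Array Int)
    (hn : ((n : Int)) = end_ - st) (hk : k ≤ n) (hP : TabP st end_ n k b a)
    (x : Int) (hx : end_ - k ≤ x) : fAltGet st end_ a x = Fv end_ x b := by
  unfold fAltGet
  by_cases hxe : x ≤ end_
  · rw [if_pos hxe, Array.getD_eq_getD_getElem?, hP ((x - st).toNat)]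
    rw [if_pos (by omega : (x - st).toNat < n + 1), if_pos (by omega : n - k ≤ (x - st).toNat)]
    simp only [Option.getD_some]
    congr 1
    omega
  · rw [if_neg hxe, Fv_gt _ _ _ (by omega)]

-- size of a table with TabP
theorem TabP_lt_size (st end_ : Int) (n k : Nat) (b : Bool) (a : Array Int)
    (hP : TabP st end_ n k b a) (i : Nat) (hi : i < n + 1) : i < a.size := by
  by_contra hcon
  have h := hP i
  rw [if_pos hi] at h
  rw [Array.getElem?_eq_none_iff.mpr (by omega)] at h
  simp at h

-- updating entry n-1-k extends TabP from k to k+1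
theorem TabP_set (st end_ : Int) (n k : Nat) (b : Bool) (a : Array Int)
    (hP : TabP st end_ n k b a) (hk : k < n) (x : Int) (hx : x = end_ - 1 - k)
    (hn : ((n : Int)) = end_ - st) :
    TabP st end_ n (k + 1) b (a.set! (x - st).toNat (Fv end_ x b)) := by
  intro i
  have hidx : (x - st).toNat = n - 1 - k := by omega
  rw [arraySet!_eq, Array.getElem?_setIfInBounds, hidx]
  by_cases hi : n - 1 - k = i
  · subst hi
    rw [if_pos rfl, if_pos (TabP_lt_size st end_ n k b a hP _ (by omega)),
      if_pos (by omega : n - 1 - k < n + 1), if_pos (by omega : n - (k + 1) ≤ n - 1 - k)]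
    congr 2
    omega
  · rw [if_neg hi, hP i]
    by_cases hi2 : i < n + 1
    · rw [if_pos hi2, if_pos hi2]
      by_cases hi3 : n - k ≤ i
      · rw [if_pos hi3, if_pos (by omega)]
      · rw [if_neg hi3, if_neg (by omega)]
    · rw [if_neg hi2, if_neg hi2]

-- the DP tables after k iterations of Source B's loop
def dpTab (st end_ : Int) (k : Nat) : Array Int × Array Int :=
  (List.range k).foldl (fun p (j : Nat) => fAltStep st end_ p (end_ - 1 - (j : Int)))
    ((Array.replicate ((end_ - st).toNat + 1) 0).set! (end_ - st).toNat 1,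
     (Array.replicate ((end_ - st).toNat + 1) 0).set! (end_ - st).toNat 1)

-- the countdown fold of f_alt IS dpTab
theorem foldl_eq_dpTab (st end_ : Int) :
    (PySem.List.pyRange (end_ - 1) (st - 1) (-1)).foldl (fAltStep st end_)
      ((Array.replicate ((end_ - st).toNat + 1) 0).set! (end_ - st).toNat 1,
       (Array.replicate ((end_ - st).toNat + 1) 0).set! (end_ - st).toNat 1)
      = dpTab st end_ (end_ - st).toNat := by
  rw [PySem.List.pyRange_neg_one, List.foldl_map, dpTab]
  have h : (end_ - 1 - (st - 1)).toNat = (end_ - st).toNat := by omega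
  rw [h]

-- loop invariant: after k iterations both tables satisfy TabP
theorem dpTab_inv (st end_ : Int) (hst : 1 ≤ st) (hlt : st < end_) :
    ∀ k : Nat, k ≤ (end_ - st).toNat →
      TabP st end_ (end_ - st).toNat k false (dpTab st end_ k).1 ∧
      TabP st end_ (end_ - st).toNat k true (dpTab st end_ k).2 := by
  have hn : (((end_ - st).toNat : Int)) = end_ - st := by omega
  set n : Nat := (end_ - st).toNat with hndef
  intro k
  induction k with
  | zero =>
    intro _
    have base : ∀ b : Bool, TabP st end_ n 0 b ((Array.replicate (n + 1) 0).set! n 1) := by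
      intro b i
      rw [arraySet!_eq, Array.getElem?_setIfInBounds]
      by_cases hi : n = i
      · subst hi
        rw [if_pos rfl, if_pos (by simp), if_pos (by omega), if_pos (by omega)]
        rw [Fv_eq _ _ _ (by omega)]
      · rw [if_neg hi, Array.getElem?_replicate]
        by_cases hi2 : i < n + 1
        · rw [if_pos hi2, if_pos hi2, if_neg (by omega)]
        · rw [if_neg hi2, if_neg hi2]
    exact ⟨base false, base true⟩
  | succ k ih =>
    intro h
    obtain ⟨ihF, ihT⟩ := ih (by omega)
    set x : Int := end_ - 1 - k with hx
    have hx1 : 1 ≤ x := by omega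
    have hxe : x < end_ := by omega
    have hstep : dpTab st end_ (k + 1) = fAltStep st end_ (dpTab st end_ k) x := by
      unfold dpTab
      rw [List.range_succ, List.foldl_append, List.foldl_cons, List.foldl_nil]
    have hF2 : fAltGet st end_ (dpTab st end_ k).1 (x + 2) = Fv end_ (x + 2) false :=
      fAltGet_eq st end_ n k false _ hn (by omega) ihF _ (by omega)
    have hF3 : fAltGet st end_ (dpTab st end_ k).1 (x * 3) = Fv end_ (x * 3) false :=
      fAltGet_eq st end_ n k false _ hn (by omega) ihF _ (by omega)
    have ht : Fv end_ (x + 2) false + Fv end_ (x * 3) false = Fv end_ x true :=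
      (Fv_rec_true _ _ hx1 hxe).symm
    have hTnew : TabP st end_ n (k + 1) true
        ((dpTab st end_ k).2.set! (x - st).toNat (Fv end_ x true)) :=
      TabP_set st end_ n k true _ ihT (by omega) x hx hn
    have hsq : x ≤ x * x := le_mul_of_one_le_left (by omega) hx1
    have hT2 : fAltGet st end_ ((dpTab st end_ k).2.set! (x - st).toNat (Fv end_ x true)) (x * x)
        = Fv end_ (x * x) true :=
      fAltGet_eq st end_ n (k + 1) true _ hn (by omega) hTnew _ (by omega)
    rw [hstep]
    unfold fAltStep
    simp only
    rw [hF2, hF3, ht, hT2, (by rw [← Fv_rec_false _ _ hx1 hxe] :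
      Fv end_ (x + 2) false + Fv end_ (x * x) true + Fv end_ (x * 3) false = Fv end_ x false)]
    exact ⟨TabP_set st end_ n k false _ ihF (by omega) x hx hn, hTnew⟩

-- ===== VERDICT (by name: the statement is the Claim_ definition above) =====
theorem f_spec : Claim_equal_f := by
  intro st end_ B _ hpre
  unfold Spec_f f f_alt
  unfold Pre_f at hpre
  rw [if_pos hpre]
  by_cases hge : st ≥ end_
  · rw [if_pos hge]
    by_cases he : st = end_
    · subst he
      rw [if_pos rfl, (by omega : 2 * (st - st).toNat + 2 = 1 + 1), fAux_succ]
      simp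
    · have hgt : st > end_ := by omega
      rw [if_neg he, (rfl : 2 * (end_ - st).toNat + 2 = (2 * (end_ - st).toNat + 1) + 1),
        fAux_succ]
      simp [hgt]
  · have hlt : st < end_ := by omega
    have hst : 1 ≤ st := by
      rcases hpre with h | h
      · exact h
      · omega
    rw [if_neg hge]
    simp only
    rw [foldl_eq_dpTab]
    obtain ⟨ihF, ihT⟩ := dpTab_inv st end_ hst hlt (end_ - st).toNat (le_refl _)
    have hval : ∀ b : Bool, ∀ a : Array Int,
        TabP st end_ (end_ - st).toNat (end_ - st).toNat b a → a.getD 0 0 = Fv end_ st b := by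
      intro b a hP
      rw [Array.getD_eq_getD_getElem?, hP 0, if_pos (by omega), if_pos (by omega)]
      simp
    have hfuel : fAux (2 * (end_ - st).toNat + 2) st end_ B = Fv end_ st B := by
      apply fAux_stable end_ _ _ st B hst
      · cases B
        · rw [fuelμ_false]
        · rw [fuelμ_true]; omega
      · exact le_refl _
    rw [hfuel]
    cases B
    · simp only [Bool.false_eq_true, if_false]
      rw [hval false _ ihF]
    · simp only [if_true]
      rw [hval true _ ihT]
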